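-- pv_equiv track=rewrite | github.com/yefansky/careFileManager | careFileMgr.py | ExtractInformation
-- ===== SOURCE A (Python) =====
-- def ExtractInformation(data, category, keys):
--     result = None
--
--     for item in data:
--         if category in item:
--             result = {'类别': category}
--             break
--
--     if result == None:
--         return None
--
--     for item in data:
--         for key in keys:
--             result[key] = "?"
--             index = 0
--             for item in data:
--                 if key in item:
--                     if ":" in item:
--                         suffix = item.split(key + ':', 1)[-1].strip()
--                         value = suffix if suffix else "?"  # 处理空字符串的情况
--                     else:
--                         value = data[index + 1]
--
--                     result[key] = value
--                     break
--                 index += 1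
--
--     return result
-- ===== SOURCE B (Python) =====
-- def ExtractInformation(data, category, keys):
--     if not any(category in item for item in data):
--         return None
--     result = {'类别': category}
--     for key in keys:
--         result[key] = "?"
--     pending = list(dict.fromkeys(keys))
--     for index, item in enumerate(data):
--         if not pending:
--             break
--         remaining = []
--         for key in pending:
--             if key in item:
--                 if ":" in item:
--                     suffix = item.split(key + ':', 1)[-1].strip()
--                     result[key] = suffix if suffix else "?"
--                 else:
--                     result[key] = data[index + 1]
--             else:
--                 remaining.append(key)
--         pending = remaining
--     return result
-- ===== Notes on version B (the rewrite author's own statement) =====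
-- stated objective: alternative
-- what changed: A's redundant outer pass over data (which re-runs a per-key scan of all of data len(data) times) is replaced by a single enumerate pass over data maintaining a pending-keys list, with result pre-seeded to '?' for every key; the per-key nested scans disappear.
import Mathlib
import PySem

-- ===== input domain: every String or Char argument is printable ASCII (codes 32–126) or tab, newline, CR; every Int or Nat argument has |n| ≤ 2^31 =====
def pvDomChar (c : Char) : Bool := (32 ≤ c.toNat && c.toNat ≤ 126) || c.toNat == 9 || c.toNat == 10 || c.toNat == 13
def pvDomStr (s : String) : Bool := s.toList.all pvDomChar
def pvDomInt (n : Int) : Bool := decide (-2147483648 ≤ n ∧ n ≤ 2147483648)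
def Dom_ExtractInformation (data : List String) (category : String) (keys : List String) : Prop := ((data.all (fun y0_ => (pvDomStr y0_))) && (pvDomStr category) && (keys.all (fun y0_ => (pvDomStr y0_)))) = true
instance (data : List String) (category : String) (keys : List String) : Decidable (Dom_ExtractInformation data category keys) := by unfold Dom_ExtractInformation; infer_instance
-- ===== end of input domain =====

-- B replaces A's redundant outer pass over data (which re-runs a per-key scan of all of data
-- len(data) times) by a single enumerate pass over data with a pending-keys list; equal output
-- on Pre_ (Pre_ excludes only the inputs on which the Python A raises IndexError — B raises there too).

-- ===== PORT A =====

-- innermost 'for item in data' scan for a key, carrying the running 'index';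
-- result: none = IndexError (data[index+1] out of range), some none = key found nowhere
-- (result[key] stays "?"), some (some v) = value found.
def pvScanA (full : List String) (key : String) : List String → Int → Option (Option String)
  | [], _ => some none
  | item :: rest, index =>
    if PySem.Str.isIn key item then
      if PySem.Str.isIn ":" item then
        -- item.split(key + ':', 1)[-1].strip(); the separator key ++ ":" is nonempty, so
        -- splitMax? is some and the parts list is nonempty (getD/getLastD defaults unreachable)
        let suffix := PySem.Str.strip (((PySem.Str.splitMax? item (key ++ ":") 1).getD []).getLastD "")
        some (some (if suffix ≠ "" then suffix else "?"))
      else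
        match PySem.List.pyGet? full (index + 1) with
        | none => none
        | some v => some (some v)
    else pvScanA full key rest (index + 1)

-- 'for key in keys': result[key] = "?", then the scan (break included in pvScanA)
def pvKeysA (data : List String) : List String → PySem.Dict String String → Option (PySem.Dict String String)
  | [], d => some d
  | k :: ks, d =>
    match pvScanA data k data 0 with
    | none => none
    | some none => pvKeysA data ks (d.insert k "?")
    | some (some v) => pvKeysA data ks ((d.insert k "?").insert k v)

-- the (redundant) outer 'for item in data'
def pvOuterA (data keys : List String) : List String → PySem.Dict String String → Option (PySem.Dict String String)
  | [], d => some d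
  | _ :: rest, d =>
    match pvKeysA data keys d with
    | none => none
    | some d' => pvOuterA data keys rest d'

def ExtractInformation (data : List String) (category : String) (keys : List String) : Option (List (String × String)) :=
  -- first loop: 'result = {类别: category}; break' on the first item containing category, else None
  if data.any (fun item => PySem.Str.isIn category item) then
    match pvOuterA data keys data (PySem.Dict.empty.insert "类别" category) with
    | none => none        -- IndexError in Python: excluded by Pre_
    | some d => some d.items
  else none

-- ===== PORT B =====

-- one item: walk the pending keys, resolving the matching ones in result, collecting
-- the rest into 'remaining' (accumulator, appended order); none = IndexError
def pvItemB (data : List String) (index : Int) (item : String) :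
    List String → PySem.Dict String String → List String → Option (PySem.Dict String String × List String)
  | [], d, rem => some (d, rem.reverse)
  | k :: ks, d, rem =>
    if PySem.Str.isIn k item then
      if PySem.Str.isIn ":" item then
        let suffix := PySem.Str.strip (((PySem.Str.splitMax? item (k ++ ":") 1).getD []).getLastD "")
        pvItemB data index item ks (d.insert k (if suffix ≠ "" then suffix else "?")) rem
      else
        match PySem.List.pyGet? data (index + 1) with
        | none => none
        | some v => pvItemB data index item ks (d.insert k v) rem
    else pvItemB data index item ks d (k :: rem)

-- 'for index, item in enumerate(data)' with early break once pending is empty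
def pvLoopB (data : List String) : List (Int × String) → PySem.Dict String String → List String → Option (PySem.Dict String String)
  | [], d, _ => some d
  | (index, item) :: rest, d, pending =>
    if pending.isEmpty then some d
    else
      match pvItemB data index item pending d [] with
      | none => none
      | some (d', pending') => pvLoopB data rest d' pending'

def ExtractInformation_alt (data : List String) (category : String) (keys : List String) : Option (List (String × String)) :=
  if data.any (fun item => PySem.Str.isIn category item) then
    -- result seeded with "?" for every key (insertion order = keys order), then the single pass
    match pvLoopB data (PySem.List.enumerate data 0)
        (keys.foldl (fun d k => d.insert k "?") (PySem.Dict.empty.insert "类别" category))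
        (PySem.List.dedup keys) with
    | none => none        -- IndexError in Python: excluded by Pre_
    | some d => some d.items
  else none

-- ===== PRECONDITION & SPEC =====

-- Pre_ excludes exactly the inputs on which the Python A raises IndexError: some item contains
-- category, and for some key the first item containing that key has no ':' and is the last item
-- (then A evaluates data[index+1] out of range; B raises the same IndexError there).
def Pre_ExtractInformation (data : List String) (category : String) (keys : List String) : Prop :=
  (data.any (fun item => PySem.Str.isIn category item) = true) →
    ∀ k ∈ keys, ∀ i : Nat, i < data.length →
      (PySem.Str.isIn k (data.getD i "") = true ∧ (∀ j : Nat, j < i → PySem.Str.isIn k (data.getD j "") = false) ∧ PySem.Str.isIn ":" (data.getD i "") = false) →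
      i + 1 < data.length
instance (data : List String) (category : String) (keys : List String) : Decidable (Pre_ExtractInformation data category keys) := by unfold Pre_ExtractInformation; infer_instance

def pvWitness_ExtractInformation : List String × String × List String := (["cat x", "k: v", "q", "7"], "cat", ["k", "q"])

def Spec_ExtractInformation (data : List String) (category : String) (keys : List String) (out : Option (List (String × String))) : Prop := out = ExtractInformation_alt data category keys
instance (data : List String) (category : String) (keys : List String) (out : Option (List (String × String))) : Decidable (Spec_ExtractInformation data category keys out) := by unfold Spec_ExtractInformation; infer_instance

-- ===== CLAIM (what is proved, stated in full; the proofs are below) =====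
def Claim_equal_ExtractInformation : Prop := ∀ (data : List String) (category : String) (keys : List String), Dom_ExtractInformation data category keys → Pre_ExtractInformation data category keys → Spec_ExtractInformation data category keys (ExtractInformation data category keys)

-- ===== LEMMAS AND PROOFS =====

-- the value A's scan resolves key k to over suffix 'rest' starting at 'index' ("?" if unresolved)
def pvVal (full : List String) (key : String) (rest : List String) (index : Int) : String :=
  match pvScanA full key rest index with
  | some (some v) => v
  | _ => "?"

-- the value B's per-item step resolves a matching key to
def pvMval (data : List String) (index : Int) (item : String) (k : String) : String :=
  if PySem.Str.isIn ":" item then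
    let suffix := PySem.Str.strip (((PySem.Str.splitMax? item (k ++ ":") 1).getD []).getLastD "")
    if suffix ≠ "" then suffix else "?"
  else (PySem.List.pyGet? data (index + 1)).getD "?"

-- ---- generic Dict facts (String keys/values) ----

lemma dict_contains_of_get? (d : PySem.Dict String String) (k v : String)
    (h : d.get? k = some v) : d.contains k = true := by
  simp only [PySem.Dict.get?, PySem.Dict.contains, Option.map_eq_some_iff] at *
  obtain ⟨p, hp, -⟩ := h
  exact List.any_eq_true.2 ⟨p, List.mem_of_find?_eq_some hp,
    List.find?_some (p := fun q : String × String => q.1 == k) hp⟩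

lemma map_replace_eq_self (l : List (String × String)) (k v : String)
    (hn : (l.map Prod.fst).Nodup)
    (h : Option.map (fun x => x.2) (List.find? (fun p => p.1 == k) l) = some v) :
    List.map (fun p => if (p.1 == k) = true then (k, v) else p) l = l := by
  induction l with
  | nil => simp at h
  | cons q l ih =>
    simp only [List.map_cons, List.nodup_cons] at hn
    by_cases hq : q.1 = k
    · simp only [List.find?_cons, show (q.1 == k) = true by simp [hq], Option.map_some] at h
      have hqv : (k, v) = q := by cases q; simp_all
      simp only [List.map_cons, show (q.1 == k) = true by simp [hq], if_pos, hqv]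
      have : List.map (fun p => if (p.1 == k) = true then (k, v) else p) l = List.map id l := by
        apply List.map_congr_left
        intro p hp
        have : p.1 ≠ k := fun hk => hn.1 (hq ▸ hk ▸ List.mem_map_of_mem hp)
        simp [this]
      rw [← hqv] at *
      simp only [this, List.map_id]
    · simp only [List.find?_cons, show (q.1 == k) = false by simp [hq]] at h
      simp only [List.map_cons, show (q.1 == k) = false by simp [hq]]
      simp only [Bool.false_eq_true, if_false, List.cons.injEq, true_and]
      exact ih hn.2 h

lemma dict_insert_eq_self (d : PySem.Dict String String) (k v : String)
    (hn : d.keys.Nodup) (h : d.get? k = some v) : d.insert k v = d := by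
  have hc := dict_contains_of_get? d k v h
  apply PySem.Dict.ext
  rw [PySem.Dict.items_insert_of_contains _ v hc]
  exact map_replace_eq_self d.items k v (by simpa [PySem.Dict.keys] using hn) h

lemma dict_insert_comm (d : PySem.Dict String String) (k k' v w : String)
    (hne : k ≠ k') (hk : d.contains k = true) :
    (d.insert k' w).insert k v = (d.insert k v).insert k' w := by
  apply PySem.Dict.ext
  have hk2 : (d.insert k' w).contains k = true := by
    rw [PySem.Dict.contains_insert]; simp [hk]
  have hk'2 : (d.insert k v).contains k' = (d.contains k') := by
    rw [PySem.Dict.contains_insert]; simp [Ne.symm hne]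
  by_cases hc' : d.contains k' = true
  · rw [PySem.Dict.items_insert_of_contains _ v hk2,
        PySem.Dict.items_insert_of_contains _ w hc',
        PySem.Dict.items_insert_of_contains _ w (by rw [hk'2]; exact hc'),
        PySem.Dict.items_insert_of_contains _ v hk]
    simp only [List.map_map]
    apply List.map_congr_left
    intro p _
    by_cases h1 : p.1 = k <;> by_cases h2 : p.1 = k' <;>
      simp [Function.comp, h1, h2, hne, Ne.symm hne]
  · rw [PySem.Dict.items_insert_of_contains _ v hk2,
        PySem.Dict.items_insert_of_not_contains _ w (by simpa using hc'),
        PySem.Dict.items_insert_of_not_contains _ w (by rw [hk'2]; simpa using hc'),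
        PySem.Dict.items_insert_of_contains _ v hk]
    simp only [List.map_append]
    simp only [List.map_cons, List.map_nil, List.append_cancel_left_eq, List.cons.injEq, and_true]
    rw [if_neg (by simp [Ne.symm hne])]

lemma insert_past_foldl (ks : List String) (f : String → String) (d : PySem.Dict String String)
    (k v : String) (hk : k ∉ ks) (hc : d.contains k = true) :
    (ks.foldl (fun d j => d.insert j (f j)) d).insert k v
      = ks.foldl (fun d j => d.insert j (f j)) (d.insert k v) := by
  induction ks generalizing d with
  | nil => rfl
  | cons j ks ih =>
    simp only [List.mem_cons, not_or] at hk
    simp only [List.foldl_cons]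
    rw [ih (d.insert j (f j)) hk.2 (by rw [PySem.Dict.contains_insert]; simp [hc]),
        dict_insert_comm _ _ _ _ _ hk.1 hc]

lemma get?_foldl_not_mem (ks : List String) (f : String → String) (d : PySem.Dict String String)
    (k : String) (hk : k ∉ ks) :
    (ks.foldl (fun d j => d.insert j (f j)) d).get? k = d.get? k := by
  induction ks generalizing d with
  | nil => rfl
  | cons j ks ih =>
    simp only [List.mem_cons, not_or] at hk
    simp only [List.foldl_cons]
    rw [ih _ hk.2, PySem.Dict.get?_insert_of_ne _ _ hk.1]

lemma get?_foldl_mem (ks : List String) (f : String → String) (d : PySem.Dict String String)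
    (k : String) (hk : k ∈ ks) :
    (ks.foldl (fun d j => d.insert j (f j)) d).get? k = some (f k) := by
  induction ks generalizing d with
  | nil => simp at hk
  | cons j ks ih =>
    simp only [List.foldl_cons]
    by_cases hm : k ∈ ks
    · exact ih _ hm
    · have : k = j := by rcases List.mem_cons.1 hk with h | h; exact h; exact absurd h hm
      subst this
      rw [get?_foldl_not_mem _ _ _ _ hm, PySem.Dict.get?_insert_self]

lemma foldl_overwrite (u : List String) (f g : String → String) (d : PySem.Dict String String)
    (hu : u.Nodup) :
    u.foldl (fun d j => d.insert j (g j)) (u.foldl (fun d j => d.insert j (f j)) d)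
      = u.foldl (fun d j => d.insert j (g j)) d := by
  induction u generalizing d with
  | nil => rfl
  | cons k ks ih =>
    simp only [List.nodup_cons] at hu
    simp only [List.foldl_cons]
    rw [insert_past_foldl ks f (d.insert k (f k)) k (g k) hu.1
          (by rw [PySem.Dict.contains_insert]; simp),
        PySem.Dict.insert_insert_self]
    exact ih _ hu.2

lemma foldl_insert_noop (p : List String) (f : String → String) (d : PySem.Dict String String)
    (hn : d.keys.Nodup) (h : ∀ k ∈ p, d.get? k = some (f k)) :
    p.foldl (fun d j => d.insert j (f j)) d = d := by
  induction p with
  | nil => rfl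
  | cons k ks ih =>
    simp only [List.foldl_cons]
    rw [dict_insert_eq_self d k (f k) hn (h k (by simp))]
    exact ih (fun j hj => h j (by simp [hj]))

lemma foldl_dedup_collapse (ks : List String) (f : String → String) (d : PySem.Dict String String)
    (hn : d.keys.Nodup) :
    ks.foldl (fun d j => d.insert j (f j)) d
      = (PySem.List.dedup ks).foldl (fun d j => d.insert j (f j)) d := by
  induction ks using List.reverseRecOn with
  | nil => rfl
  | append_singleton ks k ih =>
    rw [List.foldl_append]
    have hded : PySem.List.dedup (ks ++ [k]) = PySem.Set.add (PySem.List.dedup ks) k := by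
      simp [PySem.List.dedup, PySem.Set.ofList, List.foldl_append]
    by_cases hm : k ∈ ks
    · have hmem : k ∈ PySem.List.dedup ks := (PySem.List.mem_dedup _ _).2 hm
      have : PySem.Set.add (PySem.List.dedup ks) k = PySem.List.dedup ks := by
        (simp [PySem.Set.add]; exact hm)
      rw [hded, this, ← ih]
      simp only [List.foldl_cons, List.foldl_nil]
      have hnk : (ks.foldl (fun d j => d.insert j (f j)) d).keys.Nodup :=
        PySem.Dict.nodup_keys_foldl_insert ks (fun _ j => f j) d hn
      exact dict_insert_eq_self _ k (f k) hnk (get?_foldl_mem ks f d k hm)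
    · have hmem : k ∉ PySem.List.dedup ks := fun hc => hm ((PySem.List.mem_dedup _ _).1 hc)
      have : PySem.Set.add (PySem.List.dedup ks) k = PySem.List.dedup ks ++ [k] := by
        simp [PySem.Set.add]; exact hm
      rw [hded, this, List.foldl_append, ← ih]

-- ---- A-side characterisation ----

lemma scanA_ne_none (full : List String) (k : String) (rest : List String) (idx : Int)
    (H : ∀ j : Nat, j < rest.length →
      (PySem.Str.isIn k (rest.getD j "") = true ∧
        (∀ j' : Nat, j' < j → PySem.Str.isIn k (rest.getD j' "") = false) ∧
        PySem.Str.isIn ":" (rest.getD j "") = false) →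
      PySem.List.pyGet? full (idx + (j : Int) + 1) ≠ none) :
    pvScanA full k rest idx ≠ none := by
  induction rest generalizing idx with
  | nil => simp [pvScanA]
  | cons item rest' ih =>
    simp only [pvScanA]
    by_cases h1 : PySem.Str.isIn k item = true
    · rw [if_pos h1]
      by_cases h2 : PySem.Str.isIn ":" item = true
      · rw [if_pos h2]; simp
      · rw [if_neg h2]
        have hg := H 0 (by simp)
          ⟨by simpa using h1, fun j' hj' => absurd hj' (by omega), by simpa using (by simpa using h2 : PySem.Str.isIn ":" item = false)⟩
        cases hget : PySem.List.pyGet? full (idx + (0 : Nat) + 1) with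
        | none => exact absurd hget hg
        | some v =>
          simp only [Nat.cast_zero, add_zero] at hget
          rw [hget]; simp
    · rw [if_neg h1]
      apply ih (idx + 1)
      intro j hj hcond
      have := H (j + 1) (by simpa using Nat.succ_lt_succ hj)
        ⟨by simpa using hcond.1,
         fun j' hj' => by
           cases j' with
           | zero => simpa using (by simpa using h1 : ¬ PySem.Str.isIn k item = true)
           | succ j'' => simpa using hcond.2.1 j'' (by omega),
         by simpa using hcond.2.2⟩
      have harith : idx + ((j : Nat) + 1 : Nat) + 1 = idx + 1 + (j : Nat) + 1 := by push_cast; ring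
      rwa [harith] at this

lemma keysA_char (data : List String) (ks : List String) (d : PySem.Dict String String)
    (h : ∀ k ∈ ks, pvScanA data k data 0 ≠ none) :
    pvKeysA data ks d = some (ks.foldl (fun d k => d.insert k (pvVal data k data 0)) d) := by
  induction ks generalizing d with
  | nil => rfl
  | cons k ks ih =>
    have hk := h k (by simp)
    simp only [pvKeysA, List.foldl_cons]
    cases hscan : pvScanA data k data 0 with
    | none => exact absurd hscan hk
    | some o =>
      cases o with
      | none =>
        have hv : pvVal data k data 0 = "?" := by simp [pvVal, hscan]
        rw [hv]
        exact ih _ (fun j hj => h j (by simp [hj]))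
      | some v =>
        have hv : pvVal data k data 0 = v := by simp [pvVal, hscan]
        rw [hv]
        show pvKeysA data ks ((d.insert k "?").insert k v) = _
        rw [PySem.Dict.insert_insert_self]
        exact ih _ (fun j hj => h j (by simp [hj]))

lemma outerA_char (data keys : List String) (rest : List String) (d : PySem.Dict String String)
    (hn : d.keys.Nodup)
    (h : ∀ k ∈ keys, pvScanA data k data 0 ≠ none) :
    pvOuterA data keys rest (keys.foldl (fun d k => d.insert k (pvVal data k data 0)) d)
      = some (keys.foldl (fun d k => d.insert k (pvVal data k data 0)) d) := by
  induction rest with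
  | nil => rfl
  | cons x rest ih =>
    simp only [pvOuterA]
    rw [keysA_char data keys _ h]
    have hidem : keys.foldl (fun d k => d.insert k (pvVal data k data 0))
        (keys.foldl (fun d k => d.insert k (pvVal data k data 0)) d)
      = keys.foldl (fun d k => d.insert k (pvVal data k data 0)) d := by
      have hnf : (keys.foldl (fun d k => d.insert k (pvVal data k data 0)) d).keys.Nodup :=
        PySem.Dict.nodup_keys_foldl_insert keys (fun _ k => pvVal data k data 0) d hn
      rw [foldl_dedup_collapse keys _ _ hnf, foldl_dedup_collapse keys _ d hn,
          foldl_overwrite _ _ _ _ (PySem.List.nodup_dedup keys),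
          ← foldl_dedup_collapse keys _ d hn]
    rw [hidem]
    exact ih

lemma foldl_congr_val (p : List String) (f g : String → String)
    (h : ∀ k ∈ p, f k = g k) :
    ∀ d : PySem.Dict String String,
      p.foldl (fun d j => d.insert j (f j)) d = p.foldl (fun d j => d.insert j (g j)) d :=
  fun d => PySem.List.foldl_congr_mem p _ _ d (fun acc x hx => by rw [h x hx])

-- ---- B-side characterisation ----

lemma itemB_char (data : List String) (idx : Int) (item : String)
    (p : List String) (d : PySem.Dict String String) (rem : List String)
    (h : ∀ k ∈ p, PySem.Str.isIn k item = true → PySem.Str.isIn ":" item = false →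
      PySem.List.pyGet? data (idx + 1) ≠ none) :
    pvItemB data idx item p d rem
      = some ((p.filter (fun k => PySem.Str.isIn k item)).foldl
                (fun d k => d.insert k (pvMval data idx item k)) d,
              rem.reverse ++ p.filter (fun k => !(PySem.Str.isIn k item))) := by
  induction p generalizing d rem with
  | nil => simp [pvItemB]
  | cons k ks ih =>
    simp only [pvItemB, List.filter_cons]
    by_cases hm : PySem.Str.isIn k item = true
    · rw [if_pos hm]
      simp only [hm, Bool.not_true, Bool.false_eq_true, if_true, if_false, List.foldl_cons]
      by_cases hc : PySem.Str.isIn ":" item = true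
      · rw [if_pos hc]
        have hmv : pvMval data idx item k
            = (if (PySem.Str.strip (((PySem.Str.splitMax? item (k ++ ":") 1).getD []).getLastD "")) ≠ ""
               then PySem.Str.strip (((PySem.Str.splitMax? item (k ++ ":") 1).getD []).getLastD "") else "?") := by
          simp only [pvMval, hc, if_true]
        rw [hmv]
        exact ih _ _ (fun j hj => h j (by simp [hj]))
      · rw [if_neg hc]
        have hg := h k (by simp) hm (by simpa using hc)
        cases hget : PySem.List.pyGet? data (idx + 1) with
        | none => exact absurd hget hg
        | some v =>
          have hmv : pvMval data idx item k = v := by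
            simp only [pvMval, show PySem.Str.isIn ":" item = false by simpa using hc,
              Bool.false_eq_true, if_false, hget, Option.getD_some]
          rw [hmv]
          exact ih _ _ (fun j hj => h j (by simp [hj]))
    · rw [if_neg hm]
      simp only [show (PySem.Str.isIn k item) = false by simpa using hm, Bool.not_false,
        Bool.false_eq_true, if_false, if_true]
      rw [ih _ (k :: rem) (fun j hj => h j (by simp [hj]))]
      simp

lemma foldl_partition (p : List String) (m : String → Bool) (W : String → String)
    (d : PySem.Dict String String)
    (hp : p.Nodup) (hc : ∀ k ∈ p, d.contains k = true) :
    p.foldl (fun d k => d.insert k (W k)) d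
      = (p.filter (fun k => !(m k))).foldl (fun d k => d.insert k (W k))
          ((p.filter m).foldl (fun d k => d.insert k (W k)) d) := by
  induction p generalizing d with
  | nil => rfl
  | cons k ks ih =>
    simp only [List.nodup_cons] at hp
    simp only [List.foldl_cons, List.filter_cons]
    have hck : ∀ j ∈ ks, (d.insert k (W k)).contains j = true := fun j hj => by
      rw [PySem.Dict.contains_insert]; simp [hc j (by simp [hj])]
    by_cases hmk : m k = true
    · simp only [hmk, Bool.not_true, Bool.false_eq_true, if_true, if_false, List.foldl_cons]
      exact ih _ hp.2 hck
    · simp only [show m k = false by simpa using hmk, Bool.not_false, Bool.false_eq_true,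
        if_false, if_true, List.foldl_cons]
      have hnm : k ∉ ks.filter m := fun hmem => hp.1 (List.mem_of_mem_filter hmem)
      rw [insert_past_foldl _ _ _ _ _ hnm (hc k (by simp))]
      exact ih _ hp.2 hck

lemma pvVal_cons_matched (data : List String) (idx : Int) (item k : String) (rest : List String)
    (hm : PySem.Str.isIn k item = true) :
    pvVal data k (item :: rest) idx = pvMval data idx item k := by
  by_cases hc : PySem.Str.isIn ":" item = true
  · simp only [pvVal, pvScanA, hm, if_true, pvMval, hc]
  · simp only [pvVal, pvScanA, hm, if_true, pvMval,
      show PySem.Str.isIn ":" item = false by simpa using hc, Bool.false_eq_true, if_false]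
    cases hget : PySem.List.pyGet? data (idx + 1) <;> simp

lemma pvVal_cons_unmatched (data : List String) (idx : Int) (item k : String) (rest : List String)
    (hm : PySem.Str.isIn k item = false) :
    pvVal data k (item :: rest) idx = pvVal data k rest (idx + 1) := by
  simp only [pvVal, pvScanA, hm, Bool.false_eq_true, if_false]

lemma loopB_char (data : List String) (rest : List String) (idx : Int)
    (p : List String) (d : PySem.Dict String String)
    (hp : p.Nodup) (hn : d.keys.Nodup)
    (hq : ∀ k ∈ p, d.get? k = some "?")
    (hs : ∀ k ∈ p, pvScanA data k rest idx ≠ none) :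
    pvLoopB data (PySem.List.enumerate rest idx) d p
      = some (p.foldl (fun d k => d.insert k (pvVal data k rest idx)) d) := by
  induction rest generalizing idx p d with
  | nil =>
    rw [PySem.List.enumerate_nil]
    show some d = _
    rw [foldl_congr_val p _ (fun _ => "?") (fun k _ => by simp [pvVal, pvScanA]),
        foldl_insert_noop p _ d hn hq]
  | cons item rest' ih =>
    rw [PySem.List.enumerate_cons]
    cases p with
    | nil => rfl
    | cons k0 p' =>
      set p := k0 :: p' with hpdef
      have hpne : p.isEmpty = false := by simp [hpdef]
      show (if p.isEmpty then some d
            else match pvItemB data idx item p d [] with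
                 | none => none
                 | some (d', pending') => pvLoopB data (PySem.List.enumerate rest' (idx + 1)) d' pending') = _
      rw [hpne]
      simp only [Bool.false_eq_true, if_false]
      rw [itemB_char data idx item p d []
        (fun k hk hm hcol => fun h0 => (hs k hk) (by simp only [pvScanA, hm, hcol, h0, if_true, Bool.false_eq_true, if_false]))]
      show pvLoopB data (PySem.List.enumerate rest' (idx + 1))
            ((p.filter (fun k => PySem.Str.isIn k item)).foldl
              (fun d k => d.insert k (pvMval data idx item k)) d)
            (List.reverse [] ++ p.filter (fun k => !(PySem.Str.isIn k item))) = _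
      simp only [List.reverse_nil, List.nil_append]
      have hcont : ∀ k ∈ p, d.contains k = true :=
        fun k hk => dict_contains_of_get? d k "?" (hq k hk)
      rw [ih (idx + 1) (p.filter (fun k => !(PySem.Str.isIn k item)))
            ((p.filter (fun k => PySem.Str.isIn k item)).foldl
              (fun d k => d.insert k (pvMval data idx item k)) d)
            (hp.filter _)
            (PySem.Dict.nodup_keys_foldl_insert _ (fun _ k => pvMval data idx item k) d hn)
            (fun k hk => by
              have hkm : PySem.Str.isIn k item = false := by
                have := (List.mem_filter.1 hk).2; simpa using this
              rw [get?_foldl_not_mem _ _ _ _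
                (fun hmem => by
                  have := (List.mem_filter.1 hmem).2
                  rw [hkm] at this; simp at this)]
              exact hq k (List.mem_of_mem_filter hk))
            (fun k hk => by
              have hkm : PySem.Str.isIn k item = false := by
                have := (List.mem_filter.1 hk).2; simpa using this
              have := hs k (List.mem_of_mem_filter hk)
              simpa only [pvScanA, hkm, Bool.false_eq_true, if_false] using this)]
      congr 1
      rw [foldl_partition p (fun k => PySem.Str.isIn k item)
            (fun k => pvVal data k (item :: rest') idx) d hp hcont]
      rw [foldl_congr_val (p.filter (fun k => PySem.Str.isIn k item))
            (fun k => pvVal data k (item :: rest') idx) (fun k => pvMval data idx item k)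
            (fun k hk => pvVal_cons_matched data idx item k rest' (List.mem_filter.1 hk).2) d]
      exact (foldl_congr_val (p.filter (fun k => !(PySem.Str.isIn k item)))
            (fun k => pvVal data k (item :: rest') idx)
            (fun k => pvVal data k rest' (idx + 1))
            (fun k hk => pvVal_cons_unmatched data idx item k rest'
              (by simpa using (List.mem_filter.1 hk).2)) _).symm

lemma outerA_top (data keys : List String) (d : PySem.Dict String String)
    (hd : data ≠ []) (hn : d.keys.Nodup)
    (h : ∀ k ∈ keys, pvScanA data k data 0 ≠ none) :
    pvOuterA data keys data d
      = some (keys.foldl (fun d k => d.insert k (pvVal data k data 0)) d) := by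
  obtain ⟨x, rest, rfl⟩ : ∃ x rest, data = x :: rest := by
    cases data with
    | nil => exact absurd rfl hd
    | cons a b => exact ⟨a, b, rfl⟩
  show (match pvKeysA (x :: rest) keys d with
        | none => none
        | some d' => pvOuterA (x :: rest) keys rest d') = _
  rw [keysA_char (x :: rest) keys d h]
  exact outerA_char (x :: rest) keys rest d hn h

theorem ExtractInformation_spec : Claim_equal_ExtractInformation := by
  intro data category keys _ hpre
  show ExtractInformation data category keys = ExtractInformation_alt data category keys
  unfold ExtractInformation ExtractInformation_alt
  by_cases hany : data.any (fun item => PySem.Str.isIn category item) = true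
  · rw [if_pos hany, if_pos hany]
    have hd : data ≠ [] := by
      intro h; rw [h] at hany; simp at hany
    have hn0 : (PySem.Dict.empty.insert "类别" category).keys.Nodup :=
      PySem.Dict.nodup_keys_insert _ _ _ PySem.Dict.nodup_keys_empty
    have hscan : ∀ k ∈ keys, pvScanA data k data 0 ≠ none := by
      intro k hk
      apply scanA_ne_none
      intro j hj hcond
      have hlt := hpre hany k hk j hj hcond
      have harith : (0 : Int) + (j : Nat) + 1 = ((j + 1 : Nat) : Int) := by push_cast; ring
      rw [harith, PySem.List.pyGet?_natCast]
      intro hnone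
      rw [List.getElem?_eq_none_iff] at hnone
      omega
    rw [outerA_top data keys _ hd hn0 hscan,
        loopB_char data data 0 (PySem.List.dedup keys) _
          (PySem.List.nodup_dedup keys)
          (PySem.Dict.nodup_keys_foldl_insert keys (fun _ _ => "?") _ hn0)
          (fun k hk => get?_foldl_mem keys (fun _ => "?") _ k ((PySem.List.mem_dedup _ _).1 hk))
          (fun k hk => hscan k ((PySem.List.mem_dedup _ _).1 hk))]
    show some _ = some _
    congr 1
    beta_reduce
    rw [foldl_dedup_collapse keys (fun _ => "?") _ hn0,
        foldl_overwrite _ _ _ _ (PySem.List.nodup_dedup keys),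
        foldl_dedup_collapse keys (fun k => pvVal data k data 0) _ hn0]
  · rw [if_neg hany, if_neg hany]
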